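-- pv_equiv track=rewrite | github.com/miliar/Code_Jam_Webscraper | solutions_python/Problem_201/1183.py | compute
-- ===== SOURCE A (Python) =====
-- from math import log
--
-- def mini(n):
--     if n%2 != 0:
--         return (n-1)//2
--     else:
--         return (n//2)-1
--
-- def maxi(n):
--     if n%2 != 0:
--         return (n-1)//2
--     else:
--         return n//2
--
-- def div(n, c):
--     mx = maxi(n)
--     mn = mini(n)
--     return [[mx, c], [mn, c]]
--
-- def concat(A):
--     red = list(set([a[0] for a in A]))
--     red.sort()
--     red.reverse()
--     C = []
--     for r in red:
--         c = 0
--         for a in A: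
--             if a[0] == r:
--                 c += a[1]
--         C.append(c)
--     ans = []
--     for i in range(len(red)):
--         ans.append([red[i], C[i]])
--     return ans
--
-- def compute(N, K):
--     red = [[N, 1]]
--     lim = int(log(K, 2))
--     i = 0
--     while i != lim:
--         A = []
--         for r in red:
--             n = r[0]
--             c = r[1]
--             A.extend(div(n,c))
--         red = concat(A)
--         i += 1
--     S = K - 2**lim + 1
--     if red[0][1] < S:
--         return red[1][0]
--     else:
--         return red[0][0]
-- ===== SOURCE B (Python) =====
-- from math import log
--
-- def compute(N, K):
--     lim = int(log(K, 2))          # kept verbatim from A so K's level is computed identically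
--     P = 2 ** lim
--     q, rem = divmod(N + 1, P)     # at level lim the gaps have sizes q and q-1; rem of them are size q
--     S = K - P + 1
--     return q - 1 if rem < S else q
-- ===== Notes on version B (the rewrite author's own statement) =====
-- stated objective: simpler
-- what changed: Replaces the level-by-level simulation (repeated split + set/sort/merge of gap lists) with a closed form: one divmod of N+1 by 2**lim gives both gap sizes and the count of the larger one.
import Mathlib
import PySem

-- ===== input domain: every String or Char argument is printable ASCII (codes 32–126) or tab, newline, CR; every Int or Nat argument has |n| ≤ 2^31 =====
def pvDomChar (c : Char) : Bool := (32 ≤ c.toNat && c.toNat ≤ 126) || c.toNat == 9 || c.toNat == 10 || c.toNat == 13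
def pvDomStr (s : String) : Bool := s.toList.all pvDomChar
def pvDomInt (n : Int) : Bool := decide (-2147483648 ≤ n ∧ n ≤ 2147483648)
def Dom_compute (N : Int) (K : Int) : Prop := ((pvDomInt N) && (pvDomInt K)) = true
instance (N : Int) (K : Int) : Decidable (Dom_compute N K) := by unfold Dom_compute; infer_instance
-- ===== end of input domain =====

-- B replaces A's level-by-level split simulation by one divmod closed form (same return value on all K ≥ 1).

-- ===== PORT A =====
def miniA (n : Int) : Int :=
  if PySem.Int.mod n 2 ≠ 0 then PySem.Int.floordiv (n - 1) 2
  else PySem.Int.floordiv n 2 - 1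

def maxiA (n : Int) : Int :=
  if PySem.Int.mod n 2 ≠ 0 then PySem.Int.floordiv (n - 1) 2
  else PySem.Int.floordiv n 2

def divA (n : Int) (c : Int) : List (Int × Int) := [(maxiA n, c), (miniA n, c)]

-- concat: red = list(set(fsts)); red.sort(); red.reverse(); counts; zip back.
-- list(set(..)) has unspecified order in CPython, but the subsequent sort makes the result order-independent.
def concatA (A : List (Int × Int)) : List (Int × Int) :=
  let red := PySem.Set.ofList (A.map Prod.fst)
  let red := (PySem.List.sorted red (fun x => x) false).reverse
  let C := red.foldl (fun C r =>
    C ++ [A.foldl (fun c a => if a.1 = r then c + a.2 else c) 0]) []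
  (PySem.List.pyRange 0 (red.length : Int) 1).foldl
    (fun ans i => ans ++ [(PySem.List.pyGetD red i 0, PySem.List.pyGetD C i 0)]) []

-- the 'while i != lim' loop, run lim times
def computeLoopA (red : List (Int × Int)) : Nat → List (Int × Int)
  | 0 => red
  | n + 1 => computeLoopA (concatA (red.foldl (fun A r => A ++ divA r.1 r.2) [])) n

-- lim = int(log(K, 2)): exact equal to K.bit_length() - 1 for every 1 ≤ K ≤ 2^31 (the input domain;
-- the double log misrounds no K in that range). For K ≤ 0 Python raises ValueError → excluded by Pre_.
-- red[0]/red[1]: Python would raise IndexError on an empty/short list; never reached under Pre_ (proved below).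
def compute (N : Int) (K : Int) : Int :=
  let lim := PySem.Int.bitLength K - 1
  let red := computeLoopA [(N, 1)] lim
  let S := K - 2 ^ lim + 1
  if (PySem.List.pyGetD red 0 (0, 0)).2 < S then (PySem.List.pyGetD red 1 (0, 0)).1
  else (PySem.List.pyGetD red 0 (0, 0)).1

-- ===== PORT B =====
def compute_alt (N : Int) (K : Int) : Int :=
  let lim := PySem.Int.bitLength K - 1   -- int(log(K, 2)), exact on the domain (see note above)
  let P : Int := 2 ^ lim
  let q := PySem.Int.floordiv (N + 1) P
  let rem := PySem.Int.mod (N + 1) P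
  let S := K - P + 1
  if rem < S then q - 1 else q

-- ===== PRECONDITION & SPEC =====
-- Pre_ excludes K ≤ 0, where Python A raises ValueError (log of a non-positive number).
def Pre_compute (N : Int) (K : Int) : Prop := 1 ≤ K
instance (N : Int) (K : Int) : Decidable (Pre_compute N K) := by unfold Pre_compute; infer_instance
def pvWitness_compute : Int × Int := (10, 3)

def Spec_compute (N : Int) (K : Int) (out : Int) : Prop := out = compute_alt N K
instance (N : Int) (K : Int) (out : Int) : Decidable (Spec_compute N K out) := by unfold Spec_compute; infer_instance

-- ===== CLAIM (what is proved, stated in full; the proofs are below) =====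
def Claim_equal_compute : Prop := ∀ (N : Int) (K : Int), Dom_compute N K → Pre_compute N K → Spec_compute N K (compute N K)

-- ===== LEMMAS AND PROOFS =====

-- closed form of the gap list after i splitting levels
def gapsF (N : Int) (i : Nat) : List (Int × Int) :=
  if (N + 1) % 2 ^ i = 0 then [((N + 1) / 2 ^ i - 1, 2 ^ i)]
  else [((N + 1) / 2 ^ i, (N + 1) % 2 ^ i),
        ((N + 1) / 2 ^ i - 1, 2 ^ i - (N + 1) % 2 ^ i)]

lemma loopA_succ (n : Nat) : ∀ red, computeLoopA red (n + 1) =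
    concatA ((computeLoopA red n).foldl (fun A r => A ++ divA r.1 r.2) []) := by
  induction n with
  | zero => intro red; rfl
  | succ m ih => intro red; rw [computeLoopA, ih, computeLoopA]

lemma concatA_one (x c1 c2 : Int) : concatA [(x, c1), (x, c2)] = [(x, 0 + c1 + c2)] := by
  simp [concatA, PySem.Set.ofList, PySem.Set.add, PySem.List.sorted, PySem.List.insertBy,
    PySem.List.pyRange, PySem.List.pyGetD, PySem.List.pyGet?, PySem.List.pyIdx?, List.range_succ]

lemma concatA_two (x y c1 c2 : Int) (h : y < x) :
    concatA [(x, c1), (y, c2)] = [(x, 0 + c1), (y, 0 + c2)] := by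
  simp [concatA, PySem.Set.ofList, PySem.Set.add, PySem.List.sorted, PySem.List.insertBy,
    PySem.List.pyRange, PySem.List.pyGetD, PySem.List.pyGet?, PySem.List.pyIdx?, List.range_succ, h.ne, h.ne', h]

lemma concatA_xyyy (x y c1 c2 c3 c4 : Int) (h : y < x) :
    concatA [(x, c1), (y, c2), (y, c3), (y, c4)] = [(x, 0 + c1), (y, 0 + c2 + c3 + c4)] := by
  simp [concatA, PySem.Set.ofList, PySem.Set.add, PySem.List.sorted, PySem.List.insertBy,
    PySem.List.pyRange, PySem.List.pyGetD, PySem.List.pyGet?, PySem.List.pyIdx?, List.range_succ, h.ne, h.ne', h]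

lemma concatA_xxxy (x y c1 c2 c3 c4 : Int) (h : y < x) :
    concatA [(x, c1), (x, c2), (x, c3), (y, c4)] = [(x, 0 + c1 + c2 + c3), (y, 0 + c4)] := by
  simp [concatA, PySem.Set.ofList, PySem.Set.add, PySem.List.sorted, PySem.List.insertBy,
    PySem.List.pyRange, PySem.List.pyGetD, PySem.List.pyGet?, PySem.List.pyIdx?, List.range_succ, h.ne, h.ne', h]

lemma maxiA_eq (n : Int) : maxiA n = n / 2 := by
  unfold maxiA
  rw [PySem.Int.mod_eq_emod_of_pos (by omega), PySem.Int.floordiv_eq_ediv_of_pos (a := n - 1) (by omega),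
    PySem.Int.floordiv_eq_ediv_of_pos (a := n) (by omega)]
  split_ifs <;> omega

lemma miniA_eq (n : Int) : miniA n = if n % 2 = 0 then n / 2 - 1 else n / 2 := by
  unfold miniA
  rw [PySem.Int.mod_eq_emod_of_pos (by omega), PySem.Int.floordiv_eq_ediv_of_pos (a := n - 1) (by omega),
    PySem.Int.floordiv_eq_ediv_of_pos (a := n) (by omega)]
  split_ifs <;> omega

lemma loop_gaps (N : Int) : ∀ i : Nat, computeLoopA [(N, 1)] i = gapsF N i := by
  intro i
  induction i with
  | zero => simp [computeLoopA, gapsF]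
  | succ n ih =>
    rw [loopA_succ, ih]
    have hP : (0 : Int) < 2 ^ n := by positivity
    set P : Int := 2 ^ n with hPdef
    set q : Int := (N + 1) / P with hqdef
    set r : Int := (N + 1) % P with hrdef
    have hq : q * P + r = N + 1 := by
      rw [hqdef, hrdef]; have := Int.mul_ediv_add_emod (N + 1) P; linarith
    have hr0 : 0 ≤ r := Int.emod_nonneg _ (by omega)
    have hrP : r < P := Int.emod_lt_of_pos _ hP
    -- value of gapsF at level n+1 when N+1 = m*(2*P) + s with 0 ≤ s < 2*P
    have hgaps : ∀ m s : Int, 0 ≤ s → s < 2 * P → N + 1 = m * (2 * P) + s →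
        gapsF N (n + 1) = if s = 0 then [(m - 1, 2 * P)] else [(m, s), (m - 1, 2 * P - s)] := by
      intro m s h0 h2 hdec
      have hP' : (2 : Int) ^ (n + 1) = 2 * P := by rw [hPdef]; ring
      have hdiv : (N + 1) / (2 ^ (n + 1)) = m := by
        rw [hP', hdec, show m * (2 * P) + s = s + m * (2 * P) by ring,
          Int.add_mul_ediv_right _ _ (by omega : (2 * P) ≠ 0), Int.ediv_eq_zero_of_lt h0 h2]
        ring
      have hmod : (N + 1) % (2 ^ (n + 1)) = s := by
        rw [hP', hdec, show m * (2 * P) + s = s + 2 * P * m by ring,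
          Int.add_mul_emod_self_left, Int.emod_eq_of_lt h0 h2]
      unfold gapsF
      rw [hdiv, hmod, hP']
    clear_value P q r
    rw [show gapsF N n = (if r = 0 then [(q - 1, P)] else [(q, r), (q - 1, P - r)]) by
      unfold gapsF; rw [← hPdef, ← hqdef, ← hrdef]]
    by_cases hr : r = 0
    · -- one gap size q - 1, count P
      rw [if_pos hr]
      simp only [List.foldl, List.nil_append, divA]
      rcases Int.even_or_odd q with ⟨m, hm⟩ | ⟨m, hm⟩
      · -- q even → q - 1 odd: both halves equal m - 1
        have hmx : maxiA (q - 1) = m - 1 := by rw [maxiA_eq]; omega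
        have hmn : miniA (q - 1) = m - 1 := by rw [miniA_eq]; split_ifs <;> omega
        rw [hmx, hmn, concatA_one, hgaps m 0 le_rfl (by omega) (by rw [← hq, hm, hr]; ring)]
        rw [if_pos rfl]
        simp only [List.cons.injEq, Prod.mk.injEq, and_true, true_and]
        omega
      · -- q odd → q - 1 even: halves m and m - 1
        have hmx : maxiA (q - 1) = m := by rw [maxiA_eq]; omega
        have hmn : miniA (q - 1) = m - 1 := by rw [miniA_eq]; split_ifs <;> omega
        rw [hmx, hmn, concatA_two _ _ _ _ (by omega),
          hgaps m P (by omega) (by omega) (by rw [← hq, hm, hr]; ring)]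
        rw [if_neg (by omega)]
        simp only [List.cons.injEq, Prod.mk.injEq, and_true, true_and]
        omega
    · -- two gap sizes q (count r) and q - 1 (count P - r)
      rw [if_neg hr]
      simp only [List.foldl, List.nil_append, divA, List.cons_append,
        List.nil_append]
      rcases Int.even_or_odd q with ⟨m, hm⟩ | ⟨m, hm⟩
      · -- q even: maxi q = m, mini q = m - 1, both halves of q - 1 are m - 1
        have h1 : maxiA q = m := by rw [maxiA_eq]; omega
        have h2 : miniA q = m - 1 := by rw [miniA_eq]; split_ifs <;> omega
        have h3 : maxiA (q - 1) = m - 1 := by rw [maxiA_eq]; omega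
        have h4 : miniA (q - 1) = m - 1 := by rw [miniA_eq]; split_ifs <;> omega
        rw [h1, h2, h3, h4, concatA_xyyy _ _ _ _ _ _ (by omega),
          hgaps m r hr0 (by omega) (by rw [← hq, hm]; ring)]
        rw [if_neg hr]
        simp only [List.cons.injEq, Prod.mk.injEq, and_true, true_and]
        omega
      · -- q odd: maxi q = mini q = m, halves of q - 1 are m and m - 1
        have h1 : maxiA q = m := by rw [maxiA_eq]; omega
        have h2 : miniA q = m := by rw [miniA_eq]; split_ifs <;> omega
        have h3 : maxiA (q - 1) = m := by rw [maxiA_eq]; omega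
        have h4 : miniA (q - 1) = m - 1 := by rw [miniA_eq]; split_ifs <;> omega
        rw [h1, h2, h3, h4, concatA_xxxy _ _ _ _ _ _ (by omega),
          hgaps m (P + r) (by omega) (by omega) (by rw [← hq, hm]; ring)]
        rw [if_neg (by omega)]
        simp only [List.cons.injEq, Prod.mk.injEq, and_true, true_and]
        omega

-- ===== VERDICT (by name: the statement is the Claim_ definition above) =====
theorem compute_spec : Claim_equal_compute := by
  intro N K _ hK
  have hK1 : 1 ≤ K := hK
  unfold Spec_compute
  simp only [compute, compute_alt]
  have hK0 : K ≠ 0 := by omega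
  set L := PySem.Int.bitLength K with hL
  have h3 : (K.natAbs : Int) = K := Int.natAbs_of_nonneg (by omega)
  have hbl1 : 1 ≤ L := by
    rcases Nat.eq_zero_or_pos L with h0 | h
    · exfalso
      have h1 := PySem.Int.lt_two_pow_bitLength K
      rw [← hL, h0, pow_zero] at h1
      omega
    · exact h
  have hlow : (2 : Int) ^ (L - 1) ≤ K := by
    have h1 := PySem.Int.two_pow_bitLength_le K hK0
    rw [← hL] at h1
    calc (2 : Int) ^ (L - 1) = ((2 ^ (L - 1) : Nat) : Int) := by push_cast; ring
      _ ≤ (K.natAbs : Int) := by exact_mod_cast h1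
      _ = K := h3
  have hhigh : K < 2 * 2 ^ (L - 1) := by
    have h1 := PySem.Int.lt_two_pow_bitLength K
    rw [← hL] at h1
    calc K = (K.natAbs : Int) := h3.symm
      _ < ((2 ^ L : Nat) : Int) := by exact_mod_cast h1
      _ = 2 * 2 ^ (L - 1) := by
          have h5 : (2 : Nat) ^ L = 2 * 2 ^ (L - 1) := by
            conv_lhs => rw [show L = (L - 1) + 1 by omega]
            rw [pow_succ]; ring
          rw [h5]; push_cast; ring
  rw [loop_gaps]
  unfold gapsF
  have hP : (0 : Int) < 2 ^ (L - 1) := by positivity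
  set P : Int := 2 ^ (L - 1) with hPdef
  set q : Int := (N + 1) / P with hqdef
  set r : Int := (N + 1) % P with hrdef
  have hr0 : 0 ≤ r := Int.emod_nonneg _ (by omega)
  have hrP : r < P := Int.emod_lt_of_pos _ hP
  rw [PySem.Int.floordiv_eq_ediv_of_pos (by omega), PySem.Int.mod_eq_emod_of_pos (by omega),
    ← hqdef, ← hrdef]
  clear_value P q r
  by_cases hr : r = 0
  · rw [if_pos hr]
    simp only [PySem.List.pyGetD, PySem.List.pyGet?, PySem.List.pyIdx?]
    norm_num
    rw [if_neg (by omega), if_pos (by omega)]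
  · rw [if_neg hr]
    simp only [PySem.List.pyGetD, PySem.List.pyGet?, PySem.List.pyIdx?]
    norm_num
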